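-- pv_equiv track=rewrite | github.com/duartejr/revisao_agents | src/revisao_agents/utils/file_utils/helpers.py | fmt_chunks
-- ===== SOURCE A (Python) =====
-- from typing import List
--
-- def fmt_chunks(chunks: List[str], max_chars: int = 1200) -> str:
--     """Formats a list of text chunks into a single string, truncating if necessary.
--
--     Args:
--         chunks: List of text chunks to format.
--         max_chars: Maximum total characters in the output string.
--
--     Returns:
--         A single string with numbered chunks, truncated to max_chars."""
--     block = ""
--     for i, c in enumerate(chunks, 1):
--         row = f"[{i}] {c}\n"
--         if len(block) + len(row) > max_chars:
--             break
--         block += row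
--     return block.strip()
-- ===== SOURCE B (Python) =====
-- def fmt_chunks(chunks, max_chars=1200):
--     """Table-first: build all rows and their running lengths, then keep the
--     longest prefix of rows whose cumulative length fits in max_chars."""
--     rows = ["[%d] %s\n" % (i, c) for i, c in enumerate(chunks, 1)]
--     cums = []
--     total = 0
--     for r in rows:
--         total += len(r)
--         cums.append(total)
--     k = sum(1 for t in cums if t <= max_chars)
--     return "".join(rows[:k]).strip()
-- ===== Notes on version B (the rewrite author's own statement) =====
-- stated objective: alternative
-- what changed: Replaces A's grow-and-break accumulation loop by a table-first decomposition: build all formatted rows, compute the running prefix sums of their lengths, count how many cumulative sums fit in max_chars, and join exactly that prefix of rows.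
import Mathlib
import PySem

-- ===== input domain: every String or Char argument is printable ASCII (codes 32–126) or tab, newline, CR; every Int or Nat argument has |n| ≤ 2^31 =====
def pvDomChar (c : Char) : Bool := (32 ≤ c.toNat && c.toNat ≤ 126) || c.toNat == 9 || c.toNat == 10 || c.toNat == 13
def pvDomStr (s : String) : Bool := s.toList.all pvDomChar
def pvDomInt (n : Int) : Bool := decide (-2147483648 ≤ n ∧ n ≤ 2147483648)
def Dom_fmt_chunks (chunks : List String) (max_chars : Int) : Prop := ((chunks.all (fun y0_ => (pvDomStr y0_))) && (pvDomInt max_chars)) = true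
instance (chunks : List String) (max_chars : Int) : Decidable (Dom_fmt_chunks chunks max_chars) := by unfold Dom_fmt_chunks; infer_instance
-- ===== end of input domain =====

-- B replaces A's grow-and-break loop by a table-first decomposition (all rows, their
-- running lengths, then the longest fitting prefix is joined); objective: alternative.

-- ===== PORT A =====
-- the for-loop with break, over enumerate(chunks, 1), carrying the accumulated block
def fmtA_loop (max_chars : Int) : List (Int × String) → String → String
  | [], block => block
  | (i, c) :: rest, block =>
      let row := "[" ++ PySem.Int.toStr i ++ "] " ++ c ++ "\n"
      if PySem.Str.len block + PySem.Str.len row > max_chars then block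
      else fmtA_loop max_chars rest (block ++ row)

def fmt_chunks (chunks : List String) (max_chars : Int) : String :=
  PySem.Str.strip (fmtA_loop max_chars (PySem.List.enumerate chunks 1) "")

-- ===== PORT B =====
-- rows = ["[i] c\n" for i, c in enumerate(chunks, 1)]
def fmtB_row (p : Int × String) : String :=
  "[" ++ PySem.Int.toStr p.1 ++ "] " ++ p.2 ++ "\n"

-- the loop building cums: total starts at 0, each row appends total+len(r)
def fmtB_cums (rows : List String) : List Int :=
  (rows.foldl (fun st r => (st.1 + PySem.Str.len r, st.2 ++ [st.1 + PySem.Str.len r]))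
    ((0 : Int), ([] : List Int))).2

def fmt_chunks_alt (chunks : List String) (max_chars : Int) : String :=
  let rows := (PySem.List.enumerate chunks 1).map fmtB_row
  let cums := fmtB_cums rows
  let k := (cums.filter (fun t => decide (t ≤ max_chars))).length
  PySem.Str.strip (PySem.Str.join "" (rows.take k))

-- ===== PRECONDITION & SPEC =====
def Spec_fmt_chunks (chunks : List String) (max_chars : Int) (out : String) : Prop := out = fmt_chunks_alt chunks max_chars
instance (chunks : List String) (max_chars : Int) (out : String) : Decidable (Spec_fmt_chunks chunks max_chars out) := by unfold Spec_fmt_chunks; infer_instance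

-- ===== CLAIM (what is proved, stated in full; the proofs are below) =====
def Claim_equal_fmt_chunks : Prop := ∀ (chunks : List String) (max_chars : Int), Dom_fmt_chunks chunks max_chars → Spec_fmt_chunks chunks max_chars (fmt_chunks chunks max_chars)

-- ===== LEMMAS AND PROOFS =====

-- prefix sums of row lengths starting at t (functional view of B's cums loop)
def cumsFrom (t : Int) : List String → List Int
  | [] => []
  | r :: rs => (t + PySem.Str.len r) :: cumsFrom (t + PySem.Str.len r) rs

theorem fmtB_cums_loop_eq (rows : List String) (t : Int) (acc : List Int) :
    (rows.foldl (fun st r => (st.1 + PySem.Str.len r, st.2 ++ [st.1 + PySem.Str.len r]))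
      (t, acc)).2 = acc ++ cumsFrom t rows := by
  induction rows generalizing t acc with
  | nil => simp [cumsFrom]
  | cons r rs ih =>
    simp only [List.foldl]
    rw [ih]
    simp [cumsFrom]

theorem fmtB_cums_eq (rows : List String) : fmtB_cums rows = cumsFrom 0 rows := by
  simpa using fmtB_cums_loop_eq rows 0 []

theorem join_empty_cons (r : String) (rs : List String) :
    PySem.Str.join "" (r :: rs) = r ++ PySem.Str.join "" rs := by
  cases rs <;>
    simp [PySem.Str.join, PySem.Chars.join, List.intercalate, String.ofList_append]

theorem len_fmtB_row_pos (p : Int × String) : 0 < PySem.Str.len (fmtB_row p) := by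
  have h1 : 0 ≤ PySem.Str.len (PySem.Int.toStr p.1) := by
    simp [PySem.Str.len_eq]
  have h2 : 0 ≤ PySem.Str.len p.2 := by
    simp [PySem.Str.len_eq]
  simp only [fmtB_row, PySem.Str.len_append]
  have : PySem.Str.len "[" = 1 := by decide
  have h3 : PySem.Str.len "] " = 2 := by decide
  have h4 : PySem.Str.len "\n" = 1 := by decide
  omega

theorem cumsFrom_gt (rows : List String) (t : Int)
    (hpos : ∀ r ∈ rows, 0 < PySem.Str.len r) :
    ∀ x ∈ cumsFrom t rows, t < x := by
  induction rows generalizing t with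
  | nil => simp [cumsFrom]
  | cons r rs ih =>
    intro x hx
    simp only [cumsFrom, List.mem_cons] at hx
    have hr : 0 < PySem.Str.len r := hpos r (by simp)
    rcases hx with rfl | hx
    · omega
    · have := ih (t + PySem.Str.len r) (fun s hs => hpos s (by simp [hs])) x hx
      omega

-- main invariant: the break loop returns block ++ (join of the fitting prefix of rows)
theorem loop_eq_prefix (max_chars : Int) (pairs : List (Int × String)) (block : String)
    (t : Int) (ht : t = PySem.Str.len block) :
    fmtA_loop max_chars pairs block =
      block ++ PySem.Str.join ""
        ((pairs.map fmtB_row).take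
          (((cumsFrom t (pairs.map fmtB_row)).filter (fun x => decide (x ≤ max_chars))).length)) := by
  induction pairs generalizing block t with
  | nil => simp [fmtA_loop, cumsFrom, PySem.Str.join, PySem.Chars.join, List.intercalate]
  | cons p rest ih =>
    obtain ⟨i, c⟩ := p
    simp only [fmtA_loop, List.map_cons, cumsFrom]
    have hrow : "[" ++ PySem.Int.toStr i ++ "] " ++ c ++ "\n" = fmtB_row (i, c) := by
      simp [fmtB_row]
    by_cases hgt : PySem.Str.len block + PySem.Str.len ("[" ++ PySem.Int.toStr i ++ "] " ++ c ++ "\n") > max_chars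
    · -- break: the first cum already exceeds, so all later cums exceed too
      rw [if_pos hgt]
      have hfirst : ¬ (t + PySem.Str.len (fmtB_row (i, c)) ≤ max_chars) := by
        rw [hrow] at hgt; omega
      have hrest : ∀ x ∈ cumsFrom (t + PySem.Str.len (fmtB_row (i, c))) (rest.map fmtB_row),
          ¬ (x ≤ max_chars) := by
        intro x hx
        have := cumsFrom_gt (rest.map fmtB_row) (t + PySem.Str.len (fmtB_row (i, c)))
          (by intro r hr; obtain ⟨q, _, rfl⟩ := List.mem_map.mp hr; exact len_fmtB_row_pos q) x hx
        omega
      have hfilter : (((t + PySem.Str.len (fmtB_row (i, c))) :: cumsFrom (t + PySem.Str.len (fmtB_row (i, c))) (rest.map fmtB_row)).filter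
          (fun x => decide (x ≤ max_chars))) = [] := by
        rw [List.filter_eq_nil_iff]
        intro x hx
        simp only [List.mem_cons] at hx
        rcases hx with rfl | hx
        · simpa using hfirst
        · simpa using hrest x hx
      rw [hfilter]
      simp [PySem.Str.join, PySem.Chars.join, List.intercalate]
    · -- keep the row and continue with block ++ row
      rw [if_neg hgt]
      have hle : t + PySem.Str.len (fmtB_row (i, c)) ≤ max_chars := by
        rw [hrow] at hgt; omega
      have hfilter : (((t + PySem.Str.len (fmtB_row (i, c))) :: cumsFrom (t + PySem.Str.len (fmtB_row (i, c))) (rest.map fmtB_row)).filter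
          (fun x => decide (x ≤ max_chars))).length =
          ((cumsFrom (t + PySem.Str.len (fmtB_row (i, c))) (rest.map fmtB_row)).filter
            (fun x => decide (x ≤ max_chars))).length + 1 := by
        rw [List.filter_cons]
        have hle' : t + ((fmtB_row (i, c)).length : Int) ≤ max_chars := by
          simpa [PySem.Str.len_eq] using hle
        simp [hle']
      rw [hfilter]
      have ih' := ih (block ++ ("[" ++ PySem.Int.toStr i ++ "] " ++ c ++ "\n"))
        (t + PySem.Str.len (fmtB_row (i, c)))
        (by rw [PySem.Str.len_append, ht, hrow])
      rw [ih']
      rw [List.take_succ_cons, join_empty_cons]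
      rw [hrow]
      simp [String.append_assoc]

theorem fmt_chunks_spec : Claim_equal_fmt_chunks := by
  unfold Claim_equal_fmt_chunks
  intro chunks max_chars _
  unfold Spec_fmt_chunks fmt_chunks fmt_chunks_alt
  simp only [fmtB_cums_eq]
  rw [loop_eq_prefix max_chars (PySem.List.enumerate chunks 1) "" 0 (by decide)]
  simp
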